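-- pv_equiv track=rewrite | github.com/Auclown/algo-challenge-py | 098_tasks-types/attempt.py | tasks_types
-- ===== SOURCE A (Python) =====
-- def tasks_types(deadlines, day):
--     today = 0
--     upcoming = 0
--     later = 0
--
--     for i in range(len(deadlines)):
--         if deadlines[i] <= day:
--             today += 1
--         elif abs(deadlines[i] - day) > 7:
--             later += 1
--         else:
--             upcoming += 1
--
--     return [today, upcoming, later]
-- ===== SOURCE B (Python) =====
-- def tasks_types(deadlines, day):
--     today = sum(1 for d in deadlines if d <= day)
--     later = sum(1 for d in deadlines if d > day + 7)
--     return [today, len(deadlines) - today - later, later]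
-- ===== Notes on version B (the rewrite author's own statement) =====
-- stated objective: simpler
-- what changed: Replaces the indexed three-way if/elif/else counting loop by two filtered counts (d <= day and d > day + 7); the middle category is never branched on but recovered by subtraction from the list length.
import Mathlib
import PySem

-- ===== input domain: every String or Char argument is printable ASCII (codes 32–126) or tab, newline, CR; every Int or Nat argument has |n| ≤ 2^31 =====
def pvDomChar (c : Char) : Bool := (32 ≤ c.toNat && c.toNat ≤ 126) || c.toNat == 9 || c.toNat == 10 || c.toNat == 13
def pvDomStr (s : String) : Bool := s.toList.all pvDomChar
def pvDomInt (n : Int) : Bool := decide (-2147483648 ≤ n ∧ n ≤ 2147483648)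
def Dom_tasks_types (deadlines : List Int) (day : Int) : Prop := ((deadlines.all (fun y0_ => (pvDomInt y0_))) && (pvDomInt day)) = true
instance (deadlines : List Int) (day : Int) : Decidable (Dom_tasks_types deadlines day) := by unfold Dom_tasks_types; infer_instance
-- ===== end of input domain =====

-- B replaces the three-way counting loop by two filtered counts plus a subtraction (simpler decomposition).
-- ===== PORT A =====
-- Port of A: indexed loop over range(len(deadlines)) with the three-way if/elif/else.
def tasks_types (deadlines : List Int) (day : Int) : List Int :=
  let s := (PySem.List.pyRange 0 (deadlines.length : Int) 1).foldl
    (fun (st : Int × Int × Int) i =>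
      let d := PySem.List.pyGetD deadlines i 0
      if d ≤ day then (st.1 + 1, st.2.1, st.2.2)
      else if |d - day| > 7 then (st.1, st.2.1, st.2.2 + 1)
      else (st.1, st.2.1 + 1, st.2.2))
    (0, 0, 0)
  [s.1, s.2.1, s.2.2]

-- ===== PORT B =====
-- Port of B: two filtered counts, middle category by subtraction.
def tasks_types_alt (deadlines : List Int) (day : Int) : List Int :=
  let today : Int := (deadlines.filter (fun d => d ≤ day)).length
  let later : Int := (deadlines.filter (fun d => d > day + 7)).length
  [today, (deadlines.length : Int) - today - later, later]

-- ===== PRECONDITION & SPEC =====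
def Spec_tasks_types (deadlines : List Int) (day : Int) (out : List Int) : Prop := out = tasks_types_alt deadlines day
instance (deadlines : List Int) (day : Int) (out : List Int) : Decidable (Spec_tasks_types deadlines day out) := by unfold Spec_tasks_types; infer_instance

-- ===== CLAIM (what is proved, stated in full; the proofs are below) =====
def Claim_equal_tasks_types : Prop := ∀ (deadlines : List Int) (day : Int), Dom_tasks_types deadlines day → Spec_tasks_types deadlines day (tasks_types deadlines day)

-- ===== LEMMAS AND PROOFS =====

-- ===== VERDICT (by name: the statement is the Claim_ definition above) =====

theorem tasks_types_foldl (deadlines : List Int) (day : Int) (t u l : Int) :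
    deadlines.foldl
      (fun (st : Int × Int × Int) d =>
        if d ≤ day then (st.1 + 1, st.2.1, st.2.2)
        else if |d - day| > 7 then (st.1, st.2.1, st.2.2 + 1)
        else (st.1, st.2.1 + 1, st.2.2))
      (t, u, l)
    = (t + (deadlines.filter (fun d => d ≤ day)).length,
       u + ((deadlines.length : Int)
            - (deadlines.filter (fun d => d ≤ day)).length
            - (deadlines.filter (fun d => d > day + 7)).length),
       l + (deadlines.filter (fun d => d > day + 7)).length) := by
  induction deadlines generalizing t u l with
  | nil => simp
  | cons x xs ih =>
    simp only [List.foldl_cons, List.filter_cons, List.length_cons]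
    by_cases h1 : x ≤ day
    · simp only [h1, if_pos]
      have h2 : ¬ x > day + 7 := by omega
      rw [ih]
      simp [h1, h2]
      push_cast
      omega
    · simp only [h1, if_neg, if_false]
      by_cases h2 : |x - day| > 7
      · have h2' : x > day + 7 := by
          rcases abs_cases (x - day) with ⟨he, _⟩ | ⟨he, hn⟩ <;> omega
        rw [if_pos h2, ih]
        simp [h1, h2']
        push_cast
        omega
      · have h2' : ¬ x > day + 7 := by
          rcases abs_cases (x - day) with ⟨he, _⟩ | ⟨he, hn⟩ <;> omega
        rw [if_neg h2, ih]
        simp [h1, h2']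
        push_cast
        omega

theorem foldl_pyRange_len (deadlines : List Int) (day : Int) :
    (PySem.List.pyRange 0 (deadlines.length : Int) 1).foldl
      (fun (st : Int × Int × Int) i =>
        let d := PySem.List.pyGetD deadlines i 0
        if d ≤ day then (st.1 + 1, st.2.1, st.2.2)
        else if |d - day| > 7 then (st.1, st.2.1, st.2.2 + 1)
        else (st.1, st.2.1 + 1, st.2.2))
      (0, 0, 0)
    = deadlines.foldl
        (fun (st : Int × Int × Int) d =>
          if d ≤ day then (st.1 + 1, st.2.1, st.2.2)
          else if |d - day| > 7 then (st.1, st.2.1, st.2.2 + 1)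
          else (st.1, st.2.1 + 1, st.2.2))
        (0, 0, 0) := by
  exact PySem.List.foldl_pyRange_zero_pyGetD' deadlines 0
    (fun (st : Int × Int × Int) d =>
      if d ≤ day then (st.1 + 1, st.2.1, st.2.2)
      else if |d - day| > 7 then (st.1, st.2.1, st.2.2 + 1)
      else (st.1, st.2.1 + 1, st.2.2))
    (0, 0, 0)

theorem tasks_types_spec : Claim_equal_tasks_types := by
  intro deadlines day _
  unfold Spec_tasks_types tasks_types tasks_types_alt
  rw [foldl_pyRange_len, tasks_types_foldl]
  simp
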